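-- pv_equiv track=rewrite | github.com/morgannewellsun/icu_hypotheses | generator/code_generator_modified_2.py | seq_to_visits_naive
-- ===== SOURCE A (Python) =====
-- def seq_to_visits_naive(predicted_seqs):
--     """
--     Restructures flat medical code sequences into lists of visits.
--     Additionally undoes the medical code offset from visits_to_seq_naive.
--
--     Arguments:
--     predicted_seqs: ndarray of shape (n_patients, max_length)
--
--     Returns:
--     patients: list of patients; each is a list of visits; each is a list of medical codes
--     outcomes: list of patient outcomes
--     """
--     outcome_codes = {1, 2}
--     patients = []
--     outcomes = []
--     for predicted_seq in predicted_seqs: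
--         patient = []
--         visit = []
--         outcome = None
--         for code in predicted_seq:
--             if code in outcome_codes:
--                 outcome = True if code == 2 else False
--                 break
--             elif (len(visit) == 0) or (code > visit[-1] + 3):
--                 visit.append(int(code - 3))
--             else:
--                 patient.append(visit)
--                 visit = [int(code - 3)]
--         if len(visit) > 0:
--             patient.append(visit)
--         patients.append(patient)
--         outcomes.append(outcome)
--     return patients, outcomes
-- ===== SOURCE B (Python) =====
-- def _split_runs(prefix):
--     """Split a list of codes into maximal strictly increasing runs."""
--     runs = []
--     i = 0
--     n = len(prefix)
--     while i < n:
--         j = i + 1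
--         while j < n and prefix[j] > prefix[j - 1]:
--             j += 1
--         runs.append(prefix[i:j])
--         i = j
--     return runs
--
--
-- def _one(seq):
--     """Phase 1: locate the first outcome marker; phase 2: group the prefix into visits."""
--     seq = list(seq)
--     cut = next((i for i, c in enumerate(seq) if c in (1, 2)), len(seq))
--     outcome = None if cut == len(seq) else (seq[cut] == 2)
--     patient = [[int(c - 3) for c in run] for run in _split_runs(seq[:cut])]
--     return patient, outcome
--
--
-- def seq_to_visits_naive(predicted_seqs):
--     results = [_one(seq) for seq in predicted_seqs]
--     return [r[0] for r in results], [r[1] for r in results]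
-- ===== Notes on version B (the rewrite author's own statement) =====
-- stated objective: simpler
-- what changed: A's single fused stateful loop (visit buffer, break flag, trailing flush) is replaced by two separate phases: find the first outcome marker and truncate, then recursively split the prefix into maximal strictly increasing runs and map the -3 offset over each run.
import Mathlib
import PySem

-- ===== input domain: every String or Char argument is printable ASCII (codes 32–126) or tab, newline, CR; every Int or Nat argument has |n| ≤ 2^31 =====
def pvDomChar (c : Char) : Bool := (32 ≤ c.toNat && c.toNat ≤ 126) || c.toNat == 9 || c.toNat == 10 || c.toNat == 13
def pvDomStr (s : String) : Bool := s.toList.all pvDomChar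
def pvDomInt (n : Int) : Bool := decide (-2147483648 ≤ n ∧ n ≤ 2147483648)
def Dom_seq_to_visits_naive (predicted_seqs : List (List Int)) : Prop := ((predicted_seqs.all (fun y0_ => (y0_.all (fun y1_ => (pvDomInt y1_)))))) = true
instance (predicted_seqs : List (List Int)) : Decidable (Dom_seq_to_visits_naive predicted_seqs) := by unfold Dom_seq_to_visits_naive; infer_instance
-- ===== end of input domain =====

-- B replaces A's fused stateful loop (visit buffer + break + trailing flush) by two phases:
-- marker search / truncation, then recursive splitting into maximal strictly increasing runs. Objective: simpler.

-- ===== PORT A =====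
-- A's inner for-loop with break: recursion over the codes carrying (patient, visit); on a
-- marker it stops and returns the outcome, mirroring Python's break. visit[-1] is read as
-- visit.getLast?.getD 0 — the default is never reached, Python's 'or' short-circuits on empty visit.
def pvA_inner : List Int → List (List Int) → List Int → List (List Int) × List Int × Option Bool
  | [], patient, visit => (patient, visit, none)
  | code :: rest, patient, visit =>
    if code = 1 ∨ code = 2 then (patient, visit, some (code == 2))
    else if visit.length = 0 ∨ code > visit.getLast?.getD 0 + 3 then
      pvA_inner rest patient (visit ++ [code - 3])
    else pvA_inner rest (patient ++ [visit]) [code - 3]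

-- one iteration of A's outer loop: run the inner loop, then flush the trailing visit
def pvA_seq (seq : List Int) : List (List Int) × Option Bool :=
  let r := pvA_inner seq [] []
  (if r.2.1.length > 0 then r.1 ++ [r.2.1] else r.1, r.2.2)

def seq_to_visits_naive (predicted_seqs : List (List Int)) : List (List (List Int)) × List (Option Bool) :=
  predicted_seqs.foldl (fun acc seq => (acc.1 ++ [(pvA_seq seq).1], acc.2 ++ [(pvA_seq seq).2])) ([], [])

-- ===== PORT B =====
-- length of the maximal strictly increasing continuation after prev (Source B's while loop)
def pvRunLen : Int → List Int → Nat
  | _, [] => 0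
  | prev, c :: rest => if c > prev then 1 + pvRunLen c rest else 0

-- Source B's _split_runs: recursively peel off maximal strictly increasing runs
def pvSplitRuns : List Int → List (List Int)
  | [] => []
  | c :: rest =>
    let k := pvRunLen c rest
    (c :: rest.take k) :: pvSplitRuns (rest.drop k)
  termination_by l => l.length
  decreasing_by simp

-- Source B's cut = index of the first marker (the length if there is none)
def pvFindCut : List Int → Nat
  | [] => 0
  | c :: rest => if c = 1 ∨ c = 2 then 0 else 1 + pvFindCut rest

-- Source B's _one
def pvB_seq (seq : List Int) : List (List Int) × Option Bool :=
  let cut := pvFindCut seq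
  let outcome : Option Bool := if cut == seq.length then none else some (seq.getD cut 0 == 2)
  ((pvSplitRuns (seq.take cut)).map (fun run => run.map (fun c => c - 3)), outcome)

def seq_to_visits_naive_alt (predicted_seqs : List (List Int)) : List (List (List Int)) × List (Option Bool) :=
  let results := predicted_seqs.map pvB_seq
  (results.map Prod.fst, results.map Prod.snd)

-- ===== PRECONDITION & SPEC =====
def Spec_seq_to_visits_naive (predicted_seqs : List (List Int)) (out : List (List (List Int)) × List (Option Bool)) : Prop := out = seq_to_visits_naive_alt predicted_seqs
instance (predicted_seqs : List (List Int)) (out : List (List (List Int)) × List (Option Bool)) : Decidable (Spec_seq_to_visits_naive predicted_seqs out) := by unfold Spec_seq_to_visits_naive; infer_instance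

-- ===== CLAIM (what is proved, stated in full; the proofs are below) =====
def Claim_equal_seq_to_visits_naive : Prop := ∀ (predicted_seqs : List (List Int)), Dom_seq_to_visits_naive predicted_seqs → Spec_seq_to_visits_naive predicted_seqs (seq_to_visits_naive predicted_seqs)

-- ===== LEMMAS AND PROOFS =====

-- flush of A's inner-loop state (the two lines after A's inner loop)
def pvFlush (r : List (List Int) × List Int × Option Bool) : List (List Int) × Option Bool :=
  (if r.2.1.length > 0 then r.1 ++ [r.2.1] else r.1, r.2.2)

-- grouping of xs when a run rs ++ [lastc] is already open
def pvGroupCont (rs : List Int) (lastc : Int) (xs : List Int) : List (List Int) :=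
  ((rs ++ [lastc]) ++ xs.take (pvRunLen lastc xs)) :: pvSplitRuns (xs.drop (pvRunLen lastc xs))

-- the outcome B computes for seq
def pvOut (seq : List Int) : Option Bool :=
  if pvFindCut seq == seq.length then none else some (seq.getD (pvFindCut seq) 0 == 2)

theorem pvSplitRuns_cons (c : Int) (rest : List Int) :
    pvSplitRuns (c :: rest)
      = (c :: rest.take (pvRunLen c rest)) :: pvSplitRuns (rest.drop (pvRunLen c rest)) := by
  rw [pvSplitRuns]

theorem pvOut_cons (c : Int) (rest : List Int) (hm : ¬ (c = 1 ∨ c = 2)) :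
    pvOut (c :: rest) = pvOut rest := by
  simp [pvOut, pvFindCut, hm, Nat.add_comm]

theorem pvA_run (seq : List Int) : ∀ (patient : List (List Int)) (rs : List Int) (lastc : Int),
    pvFlush (pvA_inner seq patient ((rs ++ [lastc]).map (fun c => c - 3)))
      = (patient ++ (pvGroupCont rs lastc (seq.take (pvFindCut seq))).map (List.map (fun c => c - 3)),
         pvOut seq) := by
  induction seq with
  | nil =>
    intro patient rs lastc
    simp [pvA_inner, pvFlush, pvGroupCont, pvOut, pvFindCut, pvRunLen, pvSplitRuns]
  | cons c rest ih =>
    intro patient rs lastc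
    by_cases hm : c = 1 ∨ c = 2
    · simp [pvA_inner, hm, pvFlush, pvGroupCont, pvOut, pvFindCut, pvRunLen, pvSplitRuns]
    · have hlast : ((rs ++ [lastc]).map (fun c => c - 3)).getLast?.getD 0 = lastc - 3 := by
        simp [List.getLast?_map]
      by_cases hc : c > lastc
      · have step : pvA_inner (c :: rest) patient ((rs ++ [lastc]).map (fun c => c - 3))
            = pvA_inner rest patient (((rs ++ [lastc]) ++ [c]).map (fun c => c - 3)) := by
          rw [pvA_inner, if_neg hm, if_pos]
          · simp
          · right; rw [hlast]; omega
        rw [step, ih patient (rs ++ [lastc]) c]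
        have hg : pvGroupCont rs lastc ((c :: rest).take (pvFindCut (c :: rest)))
            = pvGroupCont (rs ++ [lastc]) c (rest.take (pvFindCut rest)) := by
          have hcut : pvFindCut (c :: rest) = 1 + pvFindCut rest := by
            simp [pvFindCut, hm]
          rw [hcut]
          have htake : (c :: rest).take (1 + pvFindCut rest) = c :: rest.take (pvFindCut rest) := by
            simp [Nat.add_comm]
          rw [htake]
          have hrl : pvRunLen lastc (c :: rest.take (pvFindCut rest))
              = 1 + pvRunLen c (rest.take (pvFindCut rest)) := by
            simp [pvRunLen, hc]
          simp [pvGroupCont, hrl, Nat.add_comm, List.append_assoc]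
        rw [hg, pvOut_cons c rest hm]
      · have step : pvA_inner (c :: rest) patient ((rs ++ [lastc]).map (fun c => c - 3))
            = pvA_inner rest (patient ++ [(rs ++ [lastc]).map (fun c => c - 3)])
                (([] ++ [c]).map (fun c => c - 3)) := by
          rw [pvA_inner, if_neg hm, if_neg]
          · simp
          · push Not
            refine ⟨by simp, ?_⟩
            rw [hlast]; omega
        rw [step, ih (patient ++ [(rs ++ [lastc]).map (fun c => c - 3)]) [] c]
        have hg : pvGroupCont rs lastc ((c :: rest).take (pvFindCut (c :: rest)))
            = (rs ++ [lastc]) :: pvGroupCont [] c (rest.take (pvFindCut rest)) := by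
          have hcut : pvFindCut (c :: rest) = 1 + pvFindCut rest := by
            simp [pvFindCut, hm]
          rw [hcut]
          have htake : (c :: rest).take (1 + pvFindCut rest) = c :: rest.take (pvFindCut rest) := by
            simp [Nat.add_comm]
          rw [htake]
          have hrl : pvRunLen lastc (c :: rest.take (pvFindCut rest)) = 0 := by
            simp [pvRunLen, hc]
          simp [pvGroupCont, hrl, pvSplitRuns_cons]
        rw [hg, pvOut_cons c rest hm]
        simp

theorem pvA_empty (seq : List Int) (patient : List (List Int)) :
    pvFlush (pvA_inner seq patient [])
      = (patient ++ (pvSplitRuns (seq.take (pvFindCut seq))).map (List.map (fun c => c - 3)),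
         pvOut seq) := by
  cases seq with
  | nil => simp [pvA_inner, pvFlush, pvOut, pvFindCut, pvSplitRuns]
  | cons c rest =>
    by_cases hm : c = 1 ∨ c = 2
    · simp [pvA_inner, hm, pvFlush, pvOut, pvFindCut, pvSplitRuns]
    · have step : pvA_inner (c :: rest) patient []
          = pvA_inner rest patient (([] ++ [c]).map (fun c => c - 3)) := by
        rw [pvA_inner, if_neg hm, if_pos]
        · simp
        · exact Or.inl rfl
      rw [step, pvA_run rest patient [] c]
      have hg : pvSplitRuns ((c :: rest).take (pvFindCut (c :: rest)))
          = pvGroupCont [] c (rest.take (pvFindCut rest)) := by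
        have hcut : pvFindCut (c :: rest) = 1 + pvFindCut rest := by
          simp [pvFindCut, hm]
        rw [hcut]
        have htake : (c :: rest).take (1 + pvFindCut rest) = c :: rest.take (pvFindCut rest) := by
          simp [Nat.add_comm]
        rw [htake, pvSplitRuns_cons]
        simp [pvGroupCont]
      rw [hg, pvOut_cons c rest hm]

theorem pvA_eq_pvB (seq : List Int) : pvA_seq seq = pvB_seq seq := by
  have := pvA_empty seq []
  simpa [pvA_seq, pvFlush, pvB_seq, pvOut] using this

theorem foldl_append_pair (l : List (List Int)) :
    ∀ (a : List (List (List Int))) (b : List (Option Bool)),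
    l.foldl (fun acc seq => (acc.1 ++ [(pvA_seq seq).1], acc.2 ++ [(pvA_seq seq).2])) (a, b)
      = (a ++ l.map (fun s => (pvA_seq s).1), b ++ l.map (fun s => (pvA_seq s).2)) := by
  induction l with
  | nil => intro a b; simp
  | cons x t ih => intro a b; simp [List.foldl_cons, ih]

-- ===== VERDICT (by name: the statement is the Claim_ definition above) =====
theorem seq_to_visits_naive_spec : Claim_equal_seq_to_visits_naive := by
  intro seqs _
  unfold Spec_seq_to_visits_naive seq_to_visits_naive seq_to_visits_naive_alt
  rw [foldl_append_pair]
  simp [pvA_eq_pvB]
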